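-- pv_equiv track=rewrite | github.com/IvanProgramming/indicators-parser | parsers/text_parser.py | filter_already_found_hashes
-- ===== SOURCE A (Python) =====
-- def filter_already_found_hashes(new_hashes: list, already_found_hashes: list) -> list:
--     """ Filters out hashes that are already found in the already_found_hashes list
--
--     Args:
--         new_hashes (list): List of hashes to filter
--         already_found_hashes (list): List of hashes to filter out
--     """
--     for already_found_hash in already_found_hashes:
--         filtered_hashes = []
--         for md5_hash in new_hashes:
--             if md5_hash not in already_found_hash:
--                 filtered_hashes.append(md5_hash)
--         new_hashes = filtered_hashes.copy()
--     return new_hashes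
-- ===== SOURCE B (Python) =====
-- def filter_already_found_hashes(new_hashes: list, already_found_hashes: list) -> list:
--     """ Filters out hashes that are already found in the already_found_hashes list """
--     blocked = {h for h in new_hashes
--                if any(h in already_found_hash for already_found_hash in already_found_hashes)}
--     return [h for h in new_hashes if h not in blocked]
-- ===== Notes on version B (the rewrite author's own statement) =====
-- stated objective: alternative
-- what changed: A's outer loop that rebuilds and copies new_hashes once per already_found entry is replaced by two staged passes: first a set of blocked hashes (those contained in some already_found entry) is built, then new_hashes is filtered once by set membership, avoiding all intermediate list rebuilds.
import Mathlib
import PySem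

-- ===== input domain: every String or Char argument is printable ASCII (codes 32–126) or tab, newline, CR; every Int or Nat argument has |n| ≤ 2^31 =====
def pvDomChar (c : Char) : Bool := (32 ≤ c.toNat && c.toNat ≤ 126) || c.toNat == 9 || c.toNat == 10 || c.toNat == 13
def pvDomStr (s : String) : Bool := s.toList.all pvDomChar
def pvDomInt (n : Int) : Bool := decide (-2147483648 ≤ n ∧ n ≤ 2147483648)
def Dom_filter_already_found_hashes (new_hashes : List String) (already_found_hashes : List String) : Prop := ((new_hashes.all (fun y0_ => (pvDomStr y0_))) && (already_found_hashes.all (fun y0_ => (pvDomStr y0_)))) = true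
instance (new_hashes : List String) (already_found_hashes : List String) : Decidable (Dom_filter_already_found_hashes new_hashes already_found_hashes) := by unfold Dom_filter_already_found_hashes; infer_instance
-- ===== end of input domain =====

-- B replaces A's per-entry rebuild/copy of new_hashes by two staged passes (a blocked set, then one membership filter); same return value, no mutation.
-- ===== PORT A =====
def filter_already_found_hashes (new_hashes : List String) (already_found_hashes : List String) : List String :=
  already_found_hashes.foldl
    (fun nh afh =>
      nh.foldl (fun filtered h => if PySem.Str.isIn h afh then filtered else filtered ++ [h]) [])
    new_hashes

-- ===== PORT B =====
-- blocked = {h for h in new_hashes if any(h in afh …)}; return [h for h in new_hashes if h not in blocked]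
def filter_already_found_hashes_alt (new_hashes : List String) (already_found_hashes : List String) : List String :=
  let blocked : PySem.Set String :=
    PySem.Set.ofList
      (new_hashes.filter (fun h => already_found_hashes.any (fun afh => PySem.Str.isIn h afh)))
  new_hashes.filter (fun h => !PySem.Set.contains blocked h)

-- ===== PRECONDITION & SPEC =====
def Spec_filter_already_found_hashes (new_hashes : List String) (already_found_hashes : List String) (out : List String) : Prop := out = filter_already_found_hashes_alt new_hashes already_found_hashes
instance (new_hashes : List String) (already_found_hashes : List String) (out : List String) : Decidable (Spec_filter_already_found_hashes new_hashes already_found_hashes out) := by unfold Spec_filter_already_found_hashes; infer_instance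

-- ===== CLAIM =====
def Claim_equal_filter_already_found_hashes : Prop := ∀ (new_hashes : List String) (already_found_hashes : List String), Dom_filter_already_found_hashes new_hashes already_found_hashes → Spec_filter_already_found_hashes new_hashes already_found_hashes (filter_already_found_hashes new_hashes already_found_hashes)

-- ===== LEMMAS AND PROOFS =====

-- A's inner rebuild loop is one filter pass (generalized over the accumulator)
theorem inner_eq_filter (nh : List String) (afh : String) (acc : List String) :
    nh.foldl (fun filtered h => if PySem.Str.isIn h afh then filtered else filtered ++ [h]) acc =
      acc ++ nh.filter (fun h => !PySem.Str.isIn h afh) := by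
  induction nh generalizing acc with
  | nil => simp
  | cons a t ih =>
    rw [List.foldl_cons, List.filter_cons, ih]
    by_cases h : PySem.Chars.isIn a.toList afh.toList = true
    · simp [h]
    · simp [h]

-- A's fold over the already_found list equals a single filter by "no entry contains h"
theorem folds_eq_filter (afs nh : List String) :
    afs.foldl
        (fun nh afh =>
          nh.foldl (fun filtered h => if PySem.Str.isIn h afh then filtered else filtered ++ [h]) [])
        nh =
      nh.filter (fun h => afs.all (fun afh => !PySem.Str.isIn h afh)) := by
  induction afs generalizing nh with
  | nil => simp
  | cons afh rest ih =>
    simp only [List.foldl_cons]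
    rw [inner_eq_filter, List.nil_append, ih, List.filter_filter]
    simp [List.all_cons, Bool.and_comm]

-- B's membership filter is the same filter: for h drawn from new_hashes,
-- h ∈ blocked ↔ some already_found entry contains h
theorem alt_eq_filter (nh afs : List String) :
    filter_already_found_hashes_alt nh afs =
      nh.filter (fun h => afs.all (fun afh => !PySem.Str.isIn h afh)) := by
  unfold filter_already_found_hashes_alt
  apply List.filter_congr
  intro h hmem
  by_cases hb : afs.any (fun afh => PySem.Str.isIn h afh) = true
  · have : h ∈ PySem.Set.ofList (nh.filter (fun h => afs.any (fun afh => PySem.Str.isIn h afh))) := by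
      rw [PySem.Set.mem_ofList, List.mem_filter]
      exact ⟨hmem, hb⟩
    rw [List.all_eq_not_any_not]
    simp only [(PySem.Set.contains_iff _ _).2 this, Bool.not_true]
    simpa using hb
  · have : h ∉ PySem.Set.ofList (nh.filter (fun h => afs.any (fun afh => PySem.Str.isIn h afh))) := by
      rw [PySem.Set.mem_ofList, List.mem_filter]
      exact fun ⟨_, hb2⟩ => hb hb2
    have hc : PySem.Set.contains (PySem.Set.ofList (nh.filter (fun h => afs.any (fun afh => PySem.Str.isIn h afh)))) h = false := by
      by_contra hcc
      exact this (((PySem.Set.contains_iff _ _).1 (by simpa using hcc)))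
    rw [List.all_eq_not_any_not, hc]
    simp only [Bool.not_false]
    simp only [Bool.not_eq_true] at hb
    simpa using hb
  -- end

-- ===== VERDICT =====
theorem filter_already_found_hashes_spec : Claim_equal_filter_already_found_hashes := by
  intro new_hashes already_found_hashes _
  unfold Spec_filter_already_found_hashes filter_already_found_hashes
  rw [alt_eq_filter, folds_eq_filter]
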